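-- pv_equiv track=rewrite | github.com/manwar/perlweeklychallenge-club | challenge-175/mohammad-anwar/python/ch-2.py | isPerfectTotient
-- ===== SOURCE A (Python) =====
-- import math
--
-- def isCoprime(a, b) -> bool:
--     return math.gcd(a, b) == 1
--
-- def isPerfectTotient(n) -> bool:
--     i = n
--     s = 0
--     while i >= 1:
--         coprimes = []
--         for j in range(1, i):
--             if isCoprime(i, j):
--                 coprimes.append(j)
--
--         i = len(coprimes)
--         s = s + i
--
--     return n == s
-- ===== SOURCE B (Python) =====
-- def isPerfectTotient(n):
--     # Euler's totient via trial-division prime factorization: O(sqrt(m)) per step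
--     # instead of A's O(m log m) coprime-counting pass.
--     def phi(m):
--         result = m
--         p = 2
--         while p * p <= m:
--             if m % p == 0:
--                 while m % p == 0:
--                     m //= p
--                 result -= result // p
--             p += 1
--         if m > 1:
--             result -= result // m
--         return result
--
--     s = 0
--     m = n
--     while m > 1:
--         m = phi(m)
--         s += m
--     return n == s
-- ===== Notes on version B (the rewrite author's own statement) =====
-- stated objective: faster
-- what changed: A counts coprimes j in 1..i-1 with a gcd test for every j at each step of the iterated-totient chain; B computes each totient directly by trial-division prime factorization (result -= result//p per prime factor), turning each chain step from O(m log m) gcd work into O(sqrt m) divisions.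
import Mathlib
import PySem

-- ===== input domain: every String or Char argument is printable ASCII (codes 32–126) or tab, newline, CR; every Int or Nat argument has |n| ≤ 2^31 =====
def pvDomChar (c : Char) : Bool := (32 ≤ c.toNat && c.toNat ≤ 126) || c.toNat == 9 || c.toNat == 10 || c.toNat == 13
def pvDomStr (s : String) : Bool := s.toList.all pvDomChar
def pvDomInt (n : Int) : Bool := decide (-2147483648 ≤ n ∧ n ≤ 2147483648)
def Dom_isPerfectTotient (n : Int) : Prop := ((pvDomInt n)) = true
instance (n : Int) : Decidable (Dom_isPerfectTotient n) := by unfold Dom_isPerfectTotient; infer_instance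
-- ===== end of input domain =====

-- B replaces A's per-step coprime-counting pass by Euler's totient computed via
-- trial-division prime factorization; same iterated-totient sum, same return value.


-- ===== PORT A =====
-- isCoprime(a, b): math.gcd(a, b) == 1
def isCoprime (a b : Int) : Bool := (Int.gcd a b : Int) == 1

-- the inner 'for j in range(1, i): if isCoprime(i, j): coprimes.append(j)' loop
def coprimesOf (i : Int) : List Int :=
  (PySem.List.pyRange 1 i 1).foldl (fun acc j => if isCoprime i j then acc ++ [j] else acc) []

-- the outer 'while i >= 1' loop carrying (i, s); the fuel only makes the recursion
-- total (i strictly decreases each pass, so n.toNat + 1 passes never run out)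
def isPTLoop (fuel : Nat) (i s : Int) : Int :=
  match fuel with
  | 0 => s
  | fuel + 1 =>
    if 1 ≤ i then
      let c : Int := ((coprimesOf i).length : Int)
      isPTLoop fuel c (s + c)
    else s

def isPerfectTotient (n : Int) : Bool := n == isPTLoop (n.toNat + 1) n 0

-- ===== PORT B =====
-- 'while m % p == 0: m //= p'; the fuel only makes the recursion total
-- (m strictly shrinks each division, so m.toNat steps never run out)
def stripFac (fuel : Nat) (p m : Int) : Int :=
  match fuel with
  | 0 => m
  | fuel + 1 =>
    if PySem.Int.mod m p = 0 then stripFac fuel p (PySem.Int.floordiv m p) else m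

-- 'while p * p <= m: …' of phi; the fuel only makes the recursion total
-- (p grows past sqrt m within m.toNat + 1 passes)
def phiFacLoop (fuel : Nat) (p m r : Int) : Int :=
  match fuel with
  | 0 => r
  | fuel + 1 =>
    if p * p ≤ m then
      if PySem.Int.mod m p = 0 then
        phiFacLoop fuel (p + 1) (stripFac m.toNat p m) (r - PySem.Int.floordiv r p)
      else
        phiFacLoop fuel (p + 1) m r
    else
      if 1 < m then r - PySem.Int.floordiv r m else r

-- phi(m) of B
def phiFac (m : Int) : Int := phiFacLoop (m.toNat + 1) 2 m m

-- the 'while m > 1: m = phi(m); s += m' loop of B; the fuel only makes the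
-- recursion total (phi(m) < m on every pass, so n.toNat + 1 passes never run out)
def totChain (fuel : Nat) (m s : Int) : Int :=
  match fuel with
  | 0 => s
  | fuel + 1 =>
    if 1 < m then
      let t : Int := phiFac m
      totChain fuel t (s + t)
    else s

def isPerfectTotient_alt (n : Int) : Bool := n == totChain (n.toNat + 1) n 0

-- ===== PRECONDITION & SPEC =====
def Spec_isPerfectTotient (n : Int) (out : Bool) : Prop := out = isPerfectTotient_alt n
instance (n : Int) (out : Bool) : Decidable (Spec_isPerfectTotient n out) := by unfold Spec_isPerfectTotient; infer_instance

-- ===== CLAIM (what is proved, stated in full; the proofs are below) =====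
def Claim_equal_isPerfectTotient : Prop := ∀ (n : Int), Dom_isPerfectTotient n → Spec_isPerfectTotient n (isPerfectTotient n)

-- ===== LEMMAS AND PROOFS =====

-- A's inner loop counts exactly the totient of i (for i ≥ 2)
theorem coprimesOf_length_totient (i : Int) (h : 2 ≤ i) :
    ((coprimesOf i).length : Int) = (Nat.totient i.toNat : Int) := by
  obtain ⟨n, rfl⟩ : ∃ n : Nat, i = (n : Int) := ⟨i.toNat, (Int.toNat_of_nonneg (by omega)).symm⟩
  have hn : 2 ≤ n := by exact_mod_cast h
  have he : coprimesOf n = (PySem.List.pyRange 1 n 1).filter (isCoprime n) := by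
    unfold coprimesOf
    rw [PySem.List.foldl_append_if (isCoprime (n:Int)) (fun x => x)]
    simp
  rw [he, PySem.List.pyRange_one]
  rw [List.filter_map, List.length_map]
  have hcast : ((n:Int) - 1).toNat = n - 1 := by omega
  rw [hcast]
  have hrhs : Nat.totient n = ((List.range n).filter (fun j => n.Coprime j)).length := by
    rw [Nat.totient]; rfl
  have hrange : List.range n = 0 :: (List.range (n-1)).map Nat.succ := by
    conv_lhs => rw [show n = (n-1) + 1 by omega]
    rw [List.range_succ_eq_map]
  rw [Int.toNat_natCast, hrhs, hrange]
  have h0 : ¬ n.Coprime 0 := by simp [Nat.coprime_zero_right]; omega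
  rw [List.filter_cons]
  simp only [decide_eq_true_eq, h0, if_false, List.filter_map, List.length_map]
  congr 1
  apply congrArg List.length
  apply List.filter_congr
  intro k hk
  simp only [Function.comp]
  have : Int.gcd (n:Int) (1 + (k:Int)) = n.gcd (1 + k) := by
    simp [Int.gcd]
    norm_cast
  simp only [isCoprime, this, Nat.Coprime, Nat.succ_eq_add_one, Nat.add_comm]
  rcases Nat.decEq (n.gcd (k + 1)) 1 with hg | hg <;> simp [hg]

-- Nat mirror of stripFac (proof-side only)
def stripN (p m : Nat) : Nat :=
  if 2 ≤ p ∧ 0 < m ∧ m % p = 0 then stripN p (m / p) else m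
termination_by m
decreasing_by
  rename_i h
  exact Nat.div_lt_self h.2.1 (by omega)

theorem stripN_le (p m : Nat) : stripN p m ≤ m := by
  fun_induction stripN p m with
  | case1 m h ih =>
    have : m / p ≤ m := Nat.div_le_self m p
    omega
  | case2 m h => exact le_refl m

-- Nat mirror of phiFacLoop (proof-side only)
def phiLoopN (p m r : Nat) : Nat :=
  if 2 ≤ p ∧ p * p ≤ m then
    if m % p = 0 then phiLoopN (p + 1) (stripN p m) (r - r / p)
    else phiLoopN (p + 1) m r
  else
    if 1 < m then r - r / m else r
termination_by m - p
decreasing_by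
  · rename_i h _
    have h1 := stripN_le p m
    have h2 : p < m := by nlinarith [h.2]
    omega
  · rename_i h _
    have h2 : p < m := by nlinarith [h.2]
    omega

-- bridge: stripFac (with enough fuel) is stripN
theorem stripFac_toNat : ∀ (f : Nat) (p m : Int), 2 ≤ p → 0 < m → m.toNat ≤ f →
    stripFac f p m = ((stripN p.toNat m.toNat : Nat) : Int) := by
  intro f
  induction f with
  | zero => intro p m hp hm hf; omega
  | succ f ih =>
    intro p m hp hm hf
    obtain ⟨P, rfl⟩ : ∃ P : Nat, p = (P : Int) := ⟨p.toNat, (Int.toNat_of_nonneg (by omega)).symm⟩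
    obtain ⟨M, rfl⟩ : ∃ M : Nat, m = (M : Int) := ⟨m.toNat, (Int.toNat_of_nonneg (by omega)).symm⟩
    have hP2 : 2 ≤ P := by exact_mod_cast hp
    have hM0 : 0 < M := by exact_mod_cast hm
    simp only [Int.toNat_natCast] at hf ⊢
    rw [stripFac]
    by_cases hmod : M % P = 0
    · rw [if_pos (by rw [PySem.Int.mod_natCast]; exact_mod_cast hmod)]
      rw [PySem.Int.floordiv_natCast]
      have hdvd : P ∣ M := Nat.dvd_of_mod_eq_zero hmod
      have hMP : 0 < M / P := Nat.div_pos (Nat.le_of_dvd hM0 hdvd) (by omega)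
      have hlt : M / P < M := Nat.div_lt_self hM0 (by omega)
      rw [ih (P : Int) ((M / P : Nat) : Int) hp (by exact_mod_cast hMP)
        (by simp only [Int.toNat_natCast]; omega)]
      simp only [Int.toNat_natCast]
      conv_rhs => rw [stripN, if_pos ⟨hP2, hM0, hmod⟩]
    · rw [if_neg (fun hc => hmod (by rw [PySem.Int.mod_natCast] at hc; exact_mod_cast hc))]
      conv_rhs => rw [stripN, if_neg (by omega)]

-- bridge: phiFacLoop (with enough fuel) is phiLoopN
theorem phiFacLoop_toNat : ∀ (f : Nat) (p m r : Int), 2 ≤ p → 0 ≤ r → (m - p).toNat < f →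
    phiFacLoop f p m r = ((phiLoopN p.toNat m.toNat r.toNat : Nat) : Int) := by
  intro f
  induction f with
  | zero => intro p m r hp hr hf; omega
  | succ f ih =>
    intro p m r hp hr hf
    rw [phiFacLoop]
    by_cases hg : p * p ≤ m
    · have hm4 : 0 < m := by nlinarith
      obtain ⟨P, rfl⟩ : ∃ P : Nat, p = (P : Int) := ⟨p.toNat, (Int.toNat_of_nonneg (by omega)).symm⟩
      obtain ⟨M, rfl⟩ : ∃ M : Nat, m = (M : Int) := ⟨m.toNat, (Int.toNat_of_nonneg (by omega)).symm⟩
      obtain ⟨R, rfl⟩ : ∃ R : Nat, r = (R : Int) := ⟨r.toNat, (Int.toNat_of_nonneg hr).symm⟩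
      have hP2 : 2 ≤ P := by exact_mod_cast hp
      have hgN : P * P ≤ M := by exact_mod_cast hg
      have hPM : P < M := by nlinarith
      simp only [Int.toNat_natCast] at hf ⊢
      rw [if_pos hg]
      by_cases hmod : M % P = 0
      · rw [if_pos (by rw [PySem.Int.mod_natCast]; exact_mod_cast hmod)]
        rw [stripFac_toNat M (P : Int) (M : Int) hp (by exact_mod_cast (show 0 < M by omega))
          (by omega)]
        simp only [Int.toNat_natCast]
        have hdle : R / P ≤ R := Nat.div_le_self _ _
        have hsub : ((R : Int)) - PySem.Int.floordiv R P = ((R - R / P : Nat) : Int) := by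
          rw [PySem.Int.floordiv_natCast]
          omega
        have hsle : stripN P M ≤ M := stripN_le P M
        rw [hsub, ih ((P : Int) + 1) ((stripN P M : Nat) : Int) ((R - R / P : Nat) : Int)
          (by omega) (Int.natCast_nonneg _) (by omega)]
        have e1 : ((P : Int) + 1).toNat = P + 1 := by omega
        rw [e1]
        simp only [Int.toNat_natCast]
        conv_rhs => rw [phiLoopN, if_pos ⟨hP2, hgN⟩, if_pos hmod]
      · rw [if_neg (fun hc => hmod (by rw [PySem.Int.mod_natCast] at hc; exact_mod_cast hc))]
        rw [ih ((P : Int) + 1) (M : Int) (R : Int) (by omega) (Int.natCast_nonneg _) (by omega)]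
        have e1 : ((P : Int) + 1).toNat = P + 1 := by omega
        rw [e1]
        simp only [Int.toNat_natCast]
        conv_rhs => rw [phiLoopN, if_pos ⟨hP2, hgN⟩, if_neg hmod]
    · rw [if_neg hg]
      obtain ⟨P, rfl⟩ : ∃ P : Nat, p = (P : Int) := ⟨p.toNat, (Int.toNat_of_nonneg (by omega)).symm⟩
      have hP2 : 2 ≤ P := by exact_mod_cast hp
      by_cases h1 : 1 < m
      · obtain ⟨M, rfl⟩ : ∃ M : Nat, m = (M : Int) := ⟨m.toNat, (Int.toNat_of_nonneg (by omega)).symm⟩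
        obtain ⟨R, rfl⟩ : ∃ R : Nat, r = (R : Int) := ⟨r.toNat, (Int.toNat_of_nonneg hr).symm⟩
        have hdle : R / M ≤ R := Nat.div_le_self _ _
        rw [if_pos h1]
        conv_rhs =>
          rw [phiLoopN]
        simp only [Int.toNat_natCast]
        rw [if_neg (fun hc : 2 ≤ P ∧ P * P ≤ M => hg (by exact_mod_cast hc.2)),
          if_pos (show 1 < M by exact_mod_cast h1)]
        rw [PySem.Int.floordiv_natCast]
        omega
      · rw [if_neg h1]
        obtain ⟨R, rfl⟩ : ∃ R : Nat, r = (R : Int) := ⟨r.toNat, (Int.toNat_of_nonneg hr).symm⟩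
        conv_rhs =>
          rw [phiLoopN]
        rw [if_neg ?_, if_neg (by omega : ¬ 1 < m.toNat)]
        · simp
        · simp only [Int.toNat_natCast]
          rintro ⟨h2, hq⟩
          apply hg
          have hm0 : 0 < m.toNat := by nlinarith
          have hmc : ((m.toNat : Int)) = m := Int.toNat_of_nonneg (by omega)
          calc ((P : Int)) * P = ((P * P : Nat) : Int) := by push_cast; ring
          _ ≤ ((m.toNat : Nat) : Int) := by exact_mod_cast hq
          _ = m := hmc

-- stripN strips exactly the p-part
theorem stripN_spec (p m : Nat) (hp : 2 ≤ p) (hm : 0 < m) :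
    ∃ a : Nat, m = p ^ a * stripN p m ∧ 0 < stripN p m ∧ ¬ p ∣ stripN p m := by
  fun_induction stripN p m with
  | case1 m h ih =>
    obtain ⟨_, hm0, hmod⟩ := h
    have hdvd : p ∣ m := Nat.dvd_of_mod_eq_zero hmod
    have hq : 0 < m / p := Nat.div_pos (Nat.le_of_dvd hm0 hdvd) (by omega)
    obtain ⟨a, ha, hs0, hsnd⟩ := ih hq
    refine ⟨a + 1, ?_, hs0, hsnd⟩
    calc m = p * (m / p) := (Nat.mul_div_cancel' hdvd).symm
    _ = p * (p ^ a * stripN p (m / p)) := by rw [← ha]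
    _ = p ^ (a + 1) * stripN p (m / p) := by ring
  | case2 m h =>
    refine ⟨0, by simp, hm, ?_⟩
    intro hdvd
    exact h ⟨hp, hm, Nat.eq_zero_of_dvd_of_lt hdvd |> fun _ => by
      exact Nat.mod_eq_zero_of_dvd hdvd⟩

-- the final step of phi: after the trial division loop, m is 1 or prime
theorem totient_final (N p m : Nat) (_hp : 2 ≤ p) (hm : 0 < m) (hmd : m ∣ N)
    (hfac : ∀ q, q.Prime → q ∣ m → p ≤ q)
    (hcop : ∀ q, q.Prime → q ∣ N / m → q < p)
    (hng : ¬ p * p ≤ m) :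
    (if 1 < m then (N / m).totient * m - (N / m).totient * m / m
     else (N / m).totient * m) = N.totient := by
  by_cases h1 : 1 < m
  · rw [if_pos h1]
    have hmp : m.Prime := by
      by_contra hnp
      have hmf := Nat.minFac_prime (show m ≠ 1 by omega)
      have h2 := Nat.minFac_sq_le_self hm hnp
      have h3 := hfac _ hmf (Nat.minFac_dvd m)
      have h4 : p * p ≤ m.minFac * m.minFac := Nat.mul_le_mul h3 h3
      rw [pow_two] at h2
      exact hng (le_trans h4 h2)
    have hnd : ¬ m ∣ N / m := by
      intro hdv
      have := hcop m hmp hdv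
      have := hfac m hmp dvd_rfl
      omega
    have hco : (N / m).Coprime m := ((hmp.coprime_iff_not_dvd).mpr hnd).symm
    have hNm : N = N / m * m := (Nat.div_mul_cancel hmd).symm
    have hdivt : (N / m).totient * m / m = (N / m).totient := Nat.mul_div_cancel _ hm
    rw [hdivt]
    conv_rhs => rw [hNm]
    rw [Nat.totient_mul hco, Nat.totient_prime hmp]
    conv_rhs => rw [Nat.mul_sub, Nat.mul_one]
  · rw [if_neg h1]
    have hm1 : m = 1 := by omega
    rw [hm1, Nat.div_one, mul_one]

-- the invariant proof: phiLoopN computes the totient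
theorem phiLoopN_totient (N : Nat) (_hN : 0 < N) :
    ∀ K p m, 2 ≤ p → 0 < m → m ∣ N →
    (∀ q, q.Prime → q ∣ m → p ≤ q) →
    (∀ q, q.Prime → q ∣ N / m → q < p) →
    m - p ≤ K → phiLoopN p m ((N / m).totient * m) = N.totient := by
  intro K
  induction K with
  | zero =>
    intro p m hp hm hmd hfac hcop hK
    rw [phiLoopN]
    split_ifs with h1 h2 h3
    · exfalso
      have : p < m := by nlinarith [h1.2]
      omega
    · exfalso
      have : p < m := by nlinarith [h1.2]
      omega
    · have := totient_final N p m hp hm hmd hfac hcop (fun hq => h1 ⟨hp, hq⟩)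
      rw [if_pos h3] at this
      exact this
    · have := totient_final N p m hp hm hmd hfac hcop (fun hq => h1 ⟨hp, hq⟩)
      rw [if_neg h3] at this
      exact this
  | succ K ihK =>
    intro p m hp hm hmd hfac hcop hK
    rw [phiLoopN]
    split_ifs with h1 h2 h3
    · -- p divides m: p is prime; strip it and recurse
      have hpm := h1.2
      have hplt : p < m := by nlinarith
      have hdvd : p ∣ m := Nat.dvd_of_mod_eq_zero h2
      have hpp : p.Prime := by
        have hmf := Nat.minFac_prime (show p ≠ 1 by omega)
        have h3 := hfac _ hmf ((Nat.minFac_dvd p).trans hdvd)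
        have h4 := Nat.minFac_le (show 0 < p by omega)
        have h5 : p.minFac = p := le_antisymm h4 h3
        rw [← h5]; exact hmf
      obtain ⟨a, hma, hs0, hsnd⟩ := stripN_spec p m (by omega) hm
      have ha1 : 1 ≤ a := by
        rcases Nat.eq_zero_or_pos a with h0 | h
        · exfalso
          rw [h0, pow_zero, one_mul] at hma
          exact hsnd (hma ▸ hdvd)
        · exact h
      have hsm : stripN p m ∣ m := Dvd.intro_left _ hma.symm
      have hsN : stripN p m ∣ N := hsm.trans hmd
      have hsle := stripN_le p m
      have hcopPm : ¬ p ∣ N / m := by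
        intro hdv
        have := hcop p hpp hdv
        omega
      have hcoNm : (N / m).Coprime (p ^ a) :=
        Nat.Coprime.pow_right a (((hpp.coprime_iff_not_dvd).mpr hcopPm).symm)
      have hNms : N / stripN p m = N / m * p ^ a := by
        obtain ⟨c, hc⟩ := hmd
        have hcq : N / m = c := by rw [hc, Nat.mul_div_cancel_left _ hm]
        have hNs : N = (c * p ^ a) * stripN p m := by
          rw [hc]
          conv_lhs => rw [hma]
          ring
        rw [hcq, hNs, Nat.mul_div_cancel _ hs0]
      have hr : (N / m).totient * m - (N / m).totient * m / p
          = (N / stripN p m).totient * stripN p m := by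
        set s := stripN p m with hsdef
        set t := (N / m).totient with htdef
        have hpa : p ^ a = p ^ (a - 1) * p := by rw [← pow_succ]; congr 1; omega
        have hmdp : m / p = p ^ (a - 1) * s := by
          conv_lhs => rw [hma, hpa]
          rw [show p ^ (a - 1) * p * s = p * (p ^ (a - 1) * s) by ring,
            Nat.mul_div_cancel_left _ (show 0 < p by omega)]
        have hdiva : t * m / p = t * (m / p) := Nat.mul_div_assoc _ hdvd
        have hm' : m = p ^ (a - 1) * p * s := by rw [hma, hpa]
        rw [hdiva, hmdp, hNms, Nat.totient_mul hcoNm, Nat.totient_prime_pow hpp ha1]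
        conv_lhs => rw [hm']
        generalize p ^ (a - 1) = q
        have e1 : t * (q * p * s) - t * (q * s)
            = (t * q * s) * p - (t * q * s) * 1 := by
          congr 1 <;> ring
        rw [e1, ← Nat.mul_sub]
        ring
      rw [hr]
      apply ihK (p + 1) (stripN p m) (by omega) hs0 hsN ?_ ?_ (by omega)
      · intro q hq hqs
        have := hfac q hq (hqs.trans hsm)
        have hne : q ≠ p := fun he => hsnd (he ▸ hqs)
        omega
      · intro q hq hdv
        rw [hNms] at hdv
        rcases (Nat.Prime.dvd_mul hq).mp hdv with hq1 | hq2
        · have := hcop q hq hq1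
          omega
        · have := (Nat.prime_dvd_prime_iff_eq hq hpp).mp (hq.dvd_of_dvd_pow hq2)
          omega
    · -- p does not divide m: advance p
      have hplt : p < m := by nlinarith [h1.2]
      apply ihK (p + 1) m (by omega) hm hmd ?_ ?_ (by omega)
      · intro q hq hqm
        have := hfac q hq hqm
        have hne : q ≠ p := by
          intro he
          exact h2 (Nat.dvd_iff_mod_eq_zero.mp (he ▸ hqm))
        omega
      · intro q hq hdv
        have := hcop q hq hdv
        omega
    · have := totient_final N p m hp hm hmd hfac hcop (fun hq => h1 ⟨hp, hq⟩)
      rw [if_pos h3] at this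
      exact this
    · have := totient_final N p m hp hm hmd hfac hcop (fun hq => h1 ⟨hp, hq⟩)
      rw [if_neg h3] at this
      exact this

-- B's phi computes the totient of m (for m ≥ 2)
theorem phiFac_totient (m : Int) (h : 2 ≤ m) :
    phiFac m = (Nat.totient m.toNat : Int) := by
  obtain ⟨M, rfl⟩ : ∃ M : Nat, m = (M : Int) := ⟨m.toNat, (Int.toNat_of_nonneg (by omega)).symm⟩
  have hM : 2 ≤ M := by exact_mod_cast h
  unfold phiFac
  rw [show ((M : Int)).toNat = M from Int.toNat_natCast M,
    phiFacLoop_toNat (M + 1) 2 (M : Int) (M : Int) (by norm_num) (Int.natCast_nonneg _)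
      (by omega)]
  simp only [Int.toNat_natCast]
  congr 1
  have hMM : (M / M).totient * M = M := by
    rw [Nat.div_self (by omega), Nat.totient_one, one_mul]
  have hmain := phiLoopN_totient M (by omega) M 2 M (by omega) (by omega) dvd_rfl
    (fun q hq _ => hq.two_le)
    (fun q hq hdv => by
      rw [Nat.div_self (by omega)] at hdv
      have := Nat.le_of_dvd one_pos hdv
      have := hq.two_le
      omega)
    (by omega)
  rw [hMM] at hmain
  show phiLoopN 2 M M = M.totient
  exact hmain

-- the two outer loops agree (whenever both have enough fuel)
theorem isPTLoop_eq_totChain : ∀ (K f g : Nat) (i s : Int), i.toNat ≤ K → K < f → K < g →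
    isPTLoop f i s = totChain g i s := by
  intro K
  induction K with
  | zero =>
    intro f g i s hK hf hg
    obtain ⟨f', rfl⟩ : ∃ f', f = f' + 1 := ⟨f - 1, by omega⟩
    obtain ⟨g', rfl⟩ : ∃ g', g = g' + 1 := ⟨g - 1, by omega⟩
    rw [isPTLoop, totChain, if_neg (by omega), if_neg (by omega)]
  | succ K ih =>
    intro f g i s hK hf hg
    obtain ⟨f', rfl⟩ : ∃ f', f = f' + 1 := ⟨f - 1, by omega⟩
    obtain ⟨g', rfl⟩ : ∃ g', g = g' + 1 := ⟨g - 1, by omega⟩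
    by_cases h2 : 2 ≤ i
    · rw [isPTLoop, totChain, if_pos (by omega : (1:Int) ≤ i), if_pos (by omega : (1:Int) < i)]
      show isPTLoop f' (((coprimesOf i).length : Int)) (s + ((coprimesOf i).length : Int))
        = totChain g' (phiFac i) (s + phiFac i)
      have hc : ((coprimesOf i).length : Int) = phiFac i := by
        rw [coprimesOf_length_totient i h2, phiFac_totient i h2]
      have hlt : (phiFac i).toNat ≤ K := by
        rw [phiFac_totient i h2, Int.toNat_natCast]
        have := Nat.totient_lt i.toNat (by omega)
        omega
      rw [hc]
      exact ih f' g' (phiFac i) (s + phiFac i) hlt (by omega) (by omega)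
    · by_cases h1 : i = 1
      · subst h1
        rw [isPTLoop, if_pos (by omega : (1:Int) ≤ 1)]
        have hc0 : ((coprimesOf 1).length : Int) = 0 := by
          unfold coprimesOf
          rw [PySem.List.pyRange_one_eq_nil le_rfl]
          rfl
        show isPTLoop f' (((coprimesOf 1).length : Int)) (s + ((coprimesOf 1).length : Int))
          = totChain (g' + 1) 1 s
        rw [hc0, totChain, if_neg (by omega)]
        cases f' with
        | zero => rw [isPTLoop]; omega
        | succ f'' => rw [isPTLoop, if_neg (by omega)]; omega
      · rw [isPTLoop, totChain, if_neg (by omega), if_neg (by omega)]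

-- ===== VERDICT (by name: the statement is the Claim_ definition above) =====
theorem isPerfectTotient_spec : Claim_equal_isPerfectTotient := by
  intro n _
  unfold Spec_isPerfectTotient isPerfectTotient isPerfectTotient_alt
  rw [isPTLoop_eq_totChain n.toNat (n.toNat + 1) (n.toNat + 1) n 0 le_rfl (by omega) (by omega)]
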